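-- pv_equiv track=rewrite | github.com/pypi-data/pypi-mirror-403 | packages/brkraw/brkraw-0.5.6-py3-none-any.whl/brkraw/core/jcamp.py | is_single_outer_paren
-- ===== SOURCE A (Python) =====
-- def is_single_outer_paren(s: str) -> bool:
--     """Check whether the entire string is wrapped by a single outer pair.
--
--     This function distinguishes between a single outer group:
--         "(a b c)"
--     and multiple outer groups:
--         "(a b)(c d)"
--
--     Angle-bracketed blocks `<...>` are ignored for the purpose of depth
--     tracking.
--
--     Args:
--         s: Input string.
--
--     Returns:
--         bool: True if the string is wrapped by exactly one outer pair of
--         parentheses, False otherwise.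
--     """
--     s = s.strip()
--     if not (s.startswith('(') and s.endswith(')')):
--         return False
--
--     depth = 0
--     angle_depth = 0
--     escape = False
--
--     for i, ch in enumerate(s):
--         if escape:
--             escape = False
--             continue
--         if ch == '\\':
--             escape = True
--             continue
--
--         if ch == '<':
--             angle_depth += 1
--         elif ch == '>':
--             angle_depth = max(angle_depth - 1, 0)
--         elif angle_depth == 0:
--             if ch == '(':
--                 depth += 1
--             elif ch == ')':
--                 depth -= 1
--         if depth == 0 and i != len(s) - 1:
--             # If depth hits 0 before the end, there are multiple outer groups.
--             return False
--     return depth == 0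
-- ===== SOURCE B (Python) =====
-- def is_single_outer_paren(s: str) -> bool:
--     s = s.strip()
--     if not (s.startswith('(') and s.endswith(')')):
--         return False
--     # pass 1: the parentheses that actually count (escape honored, angle regions masked)
--     sig = []
--     escape = False
--     angle = 0
--     for i, ch in enumerate(s):
--         if escape:
--             escape = False
--         elif ch == '\\':
--             escape = True
--         elif ch == '<':
--             angle += 1
--         elif ch == '>':
--             angle = max(angle - 1, 0)
--         elif angle == 0 and ch in '()':
--             sig.append((i, ch))
--     # pass 2: plain balance walk over the reduced list
--     depth = 0
--     last = len(s) - 1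
--     for i, ch in sig:
--         depth += 1 if ch == '(' else -1
--         if depth == 0 and i != last:
--             return False
--     return depth == 0
-- ===== Notes on version B (the rewrite author's own statement) =====
-- stated objective: alternative
-- what changed: A's single tangled scan (escape flag, angle mask, depth and early-return all interleaved) is split into a masking pass that collects only the parentheses that count as (index, char) pairs, followed by a plain balance walk over that reduced list.
import Mathlib
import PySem

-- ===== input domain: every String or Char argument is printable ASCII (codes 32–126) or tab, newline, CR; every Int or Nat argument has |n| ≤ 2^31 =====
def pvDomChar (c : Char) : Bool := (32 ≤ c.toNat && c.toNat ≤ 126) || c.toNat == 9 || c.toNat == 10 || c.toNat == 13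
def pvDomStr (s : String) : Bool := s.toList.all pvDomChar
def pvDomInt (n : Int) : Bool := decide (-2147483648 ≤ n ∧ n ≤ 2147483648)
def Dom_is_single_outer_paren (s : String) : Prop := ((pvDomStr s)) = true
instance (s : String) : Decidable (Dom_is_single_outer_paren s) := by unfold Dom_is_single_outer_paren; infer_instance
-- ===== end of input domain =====

-- B replaces A's single tangled scan by a masking pass (collect the parens that count)
-- followed by a plain balance pass over the reduced list (objective: alternative decomposition).

-- ===== PORT A =====
-- A's single for-loop over enumerate(s) with state (depth, angle_depth, escape) and early return
def pvLoopA : List Char → Nat → Nat → Int → Int → Bool → Bool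
  | [], _, _, depth, _, _ => depth == 0
  | ch :: rest, i, n, depth, angle, escape =>
    if escape then pvLoopA rest (i+1) n depth angle false
    else if ch == '\\' then pvLoopA rest (i+1) n depth angle true
    else if ch == '<' then
      if depth == 0 && i != n - 1 then false
      else pvLoopA rest (i+1) n depth (angle+1) escape
    else if ch == '>' then
      if depth == 0 && i != n - 1 then false
      else pvLoopA rest (i+1) n depth (max (angle-1) 0) escape
    else
      let depth' := if angle == 0 then
          (if ch == '(' then depth + 1 else if ch == ')' then depth - 1 else depth)
        else depth
      if depth' == 0 && i != n - 1 then false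
      else pvLoopA rest (i+1) n depth' angle escape

def is_single_outer_paren (s : String) : Bool :=
  let cs := PySem.Chars.strip s.toList
  if !(PySem.Chars.startswith cs ['('] && PySem.Chars.endswith cs [')']) then false
  else pvLoopA cs 0 cs.length 0 0 false

-- ===== PORT B =====
-- pass 1: the (index, char) list of parentheses that count
def pvSig : List Char → Nat → Int → Bool → List (Nat × Char)
  | [], _, _, _ => []
  | ch :: rest, i, angle, escape =>
    if escape then pvSig rest (i+1) angle false
    else if ch == '\\' then pvSig rest (i+1) angle true
    else if ch == '<' then pvSig rest (i+1) (angle+1) escape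
    else if ch == '>' then pvSig rest (i+1) (max (angle-1) 0) escape
    else if angle == 0 && (ch == '(' || ch == ')') then (i, ch) :: pvSig rest (i+1) angle escape
    else pvSig rest (i+1) angle escape

-- pass 2: balance walk over the reduced list (last = len(s) - 1)
def pvBal : List (Nat × Char) → Nat → Int → Bool
  | [], _, depth => depth == 0
  | (i, ch) :: rest, last, depth =>
    let depth' := depth + (if ch == '(' then 1 else -1)
    if depth' == 0 && i != last then false else pvBal rest last depth'

def is_single_outer_paren_alt (s : String) : Bool :=
  let cs := PySem.Chars.strip s.toList
  if !(PySem.Chars.startswith cs ['('] && PySem.Chars.endswith cs [')']) then false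
  else pvBal (pvSig cs 0 0 false) (cs.length - 1) 0

-- ===== PRECONDITION & SPEC =====
def Spec_is_single_outer_paren (s : String) (out : Bool) : Prop := out = is_single_outer_paren_alt s
instance (s : String) (out : Bool) : Decidable (Spec_is_single_outer_paren s out) := by unfold Spec_is_single_outer_paren; infer_instance

-- ===== CLAIM (what is proved, stated in full; the proofs are below) =====
def Claim_equal_is_single_outer_paren : Prop := ∀ (s : String), Dom_is_single_outer_paren s → Spec_is_single_outer_paren s (is_single_outer_paren s)

-- ===== LEMMAS AND PROOFS =====

-- Invariant: whenever depth = 0 mid-scan, either the suffix is empty or the very next char is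
-- an unescaped, unmasked '('; then A's per-char depth-0 check can only fire at a significant paren,
-- which is exactly where B's balance pass checks it.
theorem pvLoop_eq_bal : ∀ (cs : List Char) (i n : Nat) (depth angle : Int) (escape : Bool),
    i + cs.length = n →
    (depth = 0 → cs = [] ∨ (escape = false ∧ angle = 0 ∧ cs.head? = some '(')) →
    pvLoopA cs i n depth angle escape = pvBal (pvSig cs i angle escape) (n - 1) depth := by
  intro cs
  induction cs with
  | nil => intro i n depth angle escape _ _; simp [pvLoopA, pvSig, pvBal]
  | cons ch rest ih =>
    intro i n depth angle escape hn hinv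
    have hlen : i + 1 + rest.length = n := by simp at hn; omega
    have hne : depth = 0 → escape = false ∧ angle = 0 ∧ ch = '(' := by
      intro h0
      rcases hinv h0 with h | ⟨he, ha, hh⟩
      · simp at h
      · simp at hh; exact ⟨he, ha, hh⟩
    by_cases hesc : escape = true
    · have hd : depth ≠ 0 := fun h0 => by rw [(hne h0).1] at hesc; simp at hesc
      simp only [pvLoopA, pvSig, hesc, if_true]
      exact ih (i+1) n depth angle false hlen (fun h0 => absurd h0 hd)
    · have he : escape = false := by simpa using hesc
      by_cases hbs : ch = '\\'
      · have hd : depth ≠ 0 := fun h0 => by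
          have := (hne h0).2.2; rw [hbs] at this; exact absurd this (by decide)
        have hb : (ch == '\\') = true := by simp [hbs]
        simp only [pvLoopA, pvSig, he, hb, Bool.false_eq_true, if_false, if_true]
        exact ih (i+1) n depth angle true hlen (fun h0 => absurd h0 hd)
      · have hb : (ch == '\\') = false := by simp [hbs]
        by_cases hlt : ch = '<'
        · have hd : depth ≠ 0 := fun h0 => by
            have := (hne h0).2.2; rw [hlt] at this; exact absurd this (by decide)
          have hl : (ch == '<') = true := by simp [hlt]
          have hchk : (depth == 0 && i != n - 1) = false := by simp [hd]
          simp only [pvLoopA, pvSig, he, hb, hl, hchk, Bool.false_eq_true, if_false, if_true]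
          exact ih (i+1) n depth (angle+1) false hlen (fun h0 => absurd h0 hd)
        · have hl : (ch == '<') = false := by simp [hlt]
          by_cases hgt : ch = '>'
          · have hd : depth ≠ 0 := fun h0 => by
              have := (hne h0).2.2; rw [hgt] at this; exact absurd this (by decide)
            have hg2 : (ch == '>') = true := by simp [hgt]
            have hchk : (depth == 0 && i != n - 1) = false := by simp [hd]
            simp only [pvLoopA, pvSig, he, hb, hl, hg2, hchk, Bool.false_eq_true, if_false, if_true]
            exact ih (i+1) n depth (max (angle-1) 0) false hlen (fun h0 => absurd h0 hd)
          · have hg2 : (ch == '>') = false := by simp [hgt]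
            by_cases hang : angle = 0
            · by_cases hpar : ch = '(' ∨ ch = ')'
              · -- significant paren: both sides perform the same check, then recurse
                have hsig : (angle == 0 && (ch == '(' || ch == ')')) = true := by
                  simp [hang]; rcases hpar with h | h <;> simp [h]
                have hd' : (if angle == 0 then
                    (if ch == '(' then depth + 1 else if ch == ')' then depth - 1 else depth)
                    else depth) = depth + (if ch == '(' then 1 else -1) := by
                  rcases hpar with h | h <;> subst h <;> simp [hang] <;> try ring
                simp only [pvLoopA, pvSig, he, hb, hl, hg2, hsig, Bool.false_eq_true,
                  if_false, if_true, pvBal, hd']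
                by_cases hchk : (depth + (if ch == '(' then 1 else -1) == 0 && i != n - 1) = true
                · rw [if_pos hchk, if_pos hchk]
                · rw [if_neg hchk, if_neg hchk]
                  apply ih (i+1) n _ angle false hlen
                  intro h0
                  left
                  rw [h0] at hchk
                  simp at hchk
                  have : rest.length = 0 := by omega
                  simpa using this
              · -- insignificant character at angle 0: depth unchanged, cannot be 0
                have hd : depth ≠ 0 := fun h0 => hpar (Or.inl (hne h0).2.2)
                have h1 : (ch == '(') = false := by simp; exact fun h => hpar (Or.inl h)
                have h2 : (ch == ')') = false := by simp; exact fun h => hpar (Or.inr h)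
                have haT : (angle == 0) = true := by simp [hang]
                have hchk : (depth == 0 && i != n - 1) = false := by simp [hd]
                simp only [pvLoopA, pvSig, he, hb, hl, hg2, h1, h2, haT,
                  Bool.true_and, Bool.false_or, if_true, hchk, Bool.false_eq_true, if_false]
                exact ih (i+1) n depth angle false hlen (fun h0 => absurd h0 hd)
            · -- inside an angle region: depth unchanged (invariant forces depth ≠ 0)
              have hd : depth ≠ 0 := fun h0 => hang (hne h0).2.1
              have ha : (angle == 0) = false := by simp [hang]
              have hchk : (depth == 0 && i != n - 1) = false := by simp [hd]
              simp only [pvLoopA, pvSig, he, hb, hl, hg2, ha, hchk, Bool.false_and,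
                Bool.false_eq_true, if_false]
              exact ih (i+1) n depth angle false hlen (fun h0 => absurd h0 hd)

-- ===== VERDICT (by name: the statement is the Claim_ definition above) =====
theorem is_single_outer_paren_spec : Claim_equal_is_single_outer_paren := by
  unfold Claim_equal_is_single_outer_paren Spec_is_single_outer_paren
  intro s _
  unfold is_single_outer_paren is_single_outer_paren_alt
  set cs := PySem.Chars.strip s.toList with hcs
  by_cases hg : (PySem.Chars.startswith cs ['('] && PySem.Chars.endswith cs [')']) = true
  · simp only [hg, Bool.not_true, Bool.false_eq_true, if_false]
    have hg1 : PySem.Chars.startswith cs ['('] = true := by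
      rcases Bool.and_eq_true_iff.mp hg with ⟨h1, _⟩; exact h1
    have hpre : ['('] <+: cs := (PySem.Chars.startswith_iff _ _).mp hg1
    have hhead : cs.head? = some '(' := by
      rcases hpre with ⟨t, ht⟩; rw [← ht]; rfl
    exact pvLoop_eq_bal cs 0 cs.length 0 0 false (by simp)
      (fun _ => Or.inr ⟨rfl, rfl, hhead⟩)
  · have : (PySem.Chars.startswith cs ['('] && PySem.Chars.endswith cs [')']) = false := by
      simpa using hg
    simp only [this, Bool.not_false, if_true]
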